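-- pv_equiv track=rewrite | github.com/Coaspe/Algorithm | Programmers/Level 5/재밌는 레이싱 경기장 설계하기.py | solution
-- ===== SOURCE A (Python) =====
-- def solution(heights):
--     N = len(heights)
--     heights.sort()
--     OFFSET = N // 2
--
--     min_list = []
--
--     for i in range(OFFSET):
--         min_list.append(heights[OFFSET + i] - heights[i])
--
--     if N % 2:
--         min_list.append(heights[-1] - heights[OFFSET])
--
--     min_list.sort()
--
--     return min_list[N % 2]
-- ===== SOURCE B (Python) =====
-- def solution(heights):
--     # Sorts `heights` in place, like the original.
--     heights.sort()
--     n = len(heights)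
--     offset = n // 2
--     best = second = None
--     for i in range(offset):
--         d = heights[offset + i] - heights[i]
--         if best is None or d < best:
--             best, second = d, best
--         elif second is None or d < second:
--             second = d
--     if n % 2:
--         d = heights[-1] - heights[offset]
--         if best is None or d < best:
--             best, second = d, best
--         elif second is None or d < second:
--             second = d
--     return best if n % 2 == 0 else second
-- ===== Notes on version B (the rewrite author's own statement) =====
-- stated objective: simpler
-- what changed: Replaces A's intermediate diff list plus a second sort-and-index with a single running selection of the smallest and second-smallest difference (duplicates counted), returning best for even n and second for odd n.
import Mathlib
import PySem

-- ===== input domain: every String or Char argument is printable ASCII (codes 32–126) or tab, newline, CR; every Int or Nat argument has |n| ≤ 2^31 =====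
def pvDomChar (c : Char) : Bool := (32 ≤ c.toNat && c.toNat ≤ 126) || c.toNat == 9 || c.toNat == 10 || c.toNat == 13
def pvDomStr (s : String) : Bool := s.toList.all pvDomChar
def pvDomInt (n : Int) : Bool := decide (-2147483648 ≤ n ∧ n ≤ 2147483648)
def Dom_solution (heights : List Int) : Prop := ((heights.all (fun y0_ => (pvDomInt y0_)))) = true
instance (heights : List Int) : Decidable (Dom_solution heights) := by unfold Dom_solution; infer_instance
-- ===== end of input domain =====

-- B replaces A's intermediate diff list and second sort with a one-pass running selection of the
-- two smallest differences; both A and B sort `heights` in place (same side effect), and the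
-- equivalence proved here is about the return value.

-- ===== PORT A =====
def solution (heights : List Int) : Int :=
  let N : Int := (heights.length : Int)
  let hs := PySem.List.sorted heights (fun x => x)
  let OFFSET : Int := PySem.Int.floordiv N 2
  let min_list : List Int := (PySem.List.pyRange 0 OFFSET 1).foldl
    (fun acc i => acc ++ [(PySem.List.pyGet? hs (OFFSET + i)).getD 0 - (PySem.List.pyGet? hs i).getD 0]) []
  let min_list := if PySem.Int.mod N 2 ≠ 0 then
      min_list ++ [(PySem.List.pyGet? hs (-1)).getD 0 - (PySem.List.pyGet? hs OFFSET).getD 0]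
    else min_list
  (PySem.List.pyGet? (PySem.List.sorted min_list (fun x => x)) (PySem.Int.mod N 2)).getD 0

-- ===== PORT B =====
-- the two if/elif branches updating (best, second) in Source B
def pvUpd2 (st : Option Int × Option Int) (d : Int) : Option Int × Option Int :=
  if st.1.elim true (fun b => d < b) then (some d, st.1)
  else if st.2.elim true (fun s => d < s) then (st.1, some d)
  else st

def solution_alt (heights : List Int) : Int :=
  let hs := PySem.List.sorted heights (fun x => x)
  let n : Int := (heights.length : Int)
  let offset : Int := PySem.Int.floordiv n 2
  let st := (PySem.List.pyRange 0 offset 1).foldl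
    (fun st i => pvUpd2 st ((PySem.List.pyGet? hs (offset + i)).getD 0 - (PySem.List.pyGet? hs i).getD 0)) (none, none)
  let st := if PySem.Int.mod n 2 ≠ 0 then
      pvUpd2 st ((PySem.List.pyGet? hs (-1)).getD 0 - (PySem.List.pyGet? hs offset).getD 0)
    else st
  if PySem.Int.mod n 2 = 0 then st.1.getD 0 else st.2.getD 0

-- ===== PRECONDITION & SPEC =====
-- Pre_ excludes lists of length < 2, on which Python A raises IndexError (min_list too short).
def Pre_solution (heights : List Int) : Prop := 2 ≤ heights.length
instance (heights : List Int) : Decidable (Pre_solution heights) := by unfold Pre_solution; infer_instance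
def pvWitness_solution : List Int := ([3, 1, 4, 1, 5])

def Spec_solution (heights : List Int) (out : Int) : Prop := out = solution_alt heights
instance (heights : List Int) (out : Int) : Decidable (Spec_solution heights out) := by unfold Spec_solution; infer_instance

-- ===== CLAIM (what is proved, stated in full; the proofs are below) =====
def Claim_equal_solution : Prop := ∀ (heights : List Int), Dom_solution heights → Pre_solution heights → Spec_solution heights (solution heights)

-- ===== LEMMAS AND PROOFS =====

-- one pvUpd2 step tracks the first two elements of an insertion
theorem pvUpd2_insertBy (l : List Int) (d : Int) :
    pvUpd2 (l[0]?, l[1]?) d =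
      ((PySem.List.insertBy (fun a b => decide (a < b)) d l)[0]?,
       (PySem.List.insertBy (fun a b => decide (a < b)) d l)[1]?) := by
  match l with
  | [] => simp [pvUpd2, PySem.List.insertBy]
  | [a] =>
    simp only [pvUpd2, PySem.List.insertBy]
    split_ifs with h1 h2 <;> simp_all
  | a :: b :: t =>
    simp only [pvUpd2, PySem.List.insertBy]
    split_ifs with h1 h2 <;> simp_all

theorem foldl_pvUpd2 (ds : List Int) (l : List Int) :
    ds.foldl pvUpd2 (l[0]?, l[1]?) =
      ((ds.foldl (fun acc x => PySem.List.insertBy (fun a b => decide (a < b)) x acc) l)[0]?,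
       (ds.foldl (fun acc x => PySem.List.insertBy (fun a b => decide (a < b)) x acc) l)[1]?) := by
  induction ds generalizing l with
  | nil => simp
  | cons d ds ih =>
    simp only [List.foldl_cons, pvUpd2_insertBy]
    exact ih _

-- the running selection over ds yields the first two elements of sorted(ds)
theorem foldl_pvUpd2_sorted (ds : List Int) :
    ds.foldl pvUpd2 (none, none) =
      ((PySem.List.sorted ds (fun x => x))[0]?, (PySem.List.sorted ds (fun x => x))[1]?) := by
  have h := foldl_pvUpd2 ds []
  simpa [PySem.List.sorted_eq_foldl_insertBy] using h

-- A's append loop builds the mapped list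
theorem foldl_append_map (g : Int → Int) (r : List Int) (init : List Int) :
    r.foldl (fun acc i => acc ++ [g i]) init = init ++ r.map g := by
  induction r generalizing init with
  | nil => simp
  | cons x xs ih => simp [ih]

-- the common core: A's sort-then-index equals B's running selection, for any diff generator
theorem pv_core (g : Int → Int) (r : List Int) (t m : Int) (hm : m = 0 ∨ m = 1) :
    (PySem.List.pyGet?
        (PySem.List.sorted
          (if m ≠ 0 then r.foldl (fun acc i => acc ++ [g i]) [] ++ [t]
           else r.foldl (fun acc i => acc ++ [g i]) []) (fun x => x)) m).getD 0 =
      (if m = 0 then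
        (if m ≠ 0 then
            pvUpd2 (r.foldl (fun st i => pvUpd2 st (g i)) (none, none)) t
          else r.foldl (fun st i => pvUpd2 st (g i)) (none, none)).1.getD 0
      else
        (if m ≠ 0 then
            pvUpd2 (r.foldl (fun st i => pvUpd2 st (g i)) (none, none)) t
          else r.foldl (fun st i => pvUpd2 st (g i)) (none, none)).2.getD 0) := by
  have hbase : r.foldl (fun acc i => acc ++ [g i]) ([] : List Int) = r.map g := by
    simpa using foldl_append_map g r []
  have hB : r.foldl (fun st i => pvUpd2 st (g i)) (none, none) =
      (r.map g).foldl pvUpd2 (none, none) := (List.foldl_map).symm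
  rcases hm with hm | hm <;> subst hm
  · simp only [ne_eq, not_true_eq_false, if_false, if_true, hbase, hB]
    rw [foldl_pvUpd2_sorted, PySem.List.pyGet?_zero]
  · have h1 : (1 : Int) ≠ 0 := by decide
    simp only [ne_eq, h1, not_false_eq_true, if_true, reduceIte, hbase, hB]
    have hstep : pvUpd2 ((r.map g).foldl pvUpd2 (none, none)) t =
        ((r.map g) ++ [t]).foldl pvUpd2 (none, none) := by
      simp [List.foldl_append]
    rw [hstep, foldl_pvUpd2_sorted]
    rw [PySem.List.pyGet?_of_nonneg _ (by decide)]
    norm_num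

theorem solution_eq_alt (heights : List Int) : solution heights = solution_alt heights := by
  have hmod : PySem.Int.mod ((heights.length : Int)) 2 = 0 ∨
      PySem.Int.mod ((heights.length : Int)) 2 = 1 := by
    simp only [PySem.Int.mod]
    rw [Int.fmod_eq_emod]
    simp
    omega
  unfold solution solution_alt
  exact pv_core _ _ _ _ hmod

-- ===== VERDICT (by name: the statement is the Claim_ definition above) =====
theorem solution_spec : Claim_equal_solution := by
  intro heights _ _
  unfold Spec_solution
  exact solution_eq_alt heights
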